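-- pv_equiv track=rewrite | github.com/m1sterzer0/JuliaAtcoder | python/abc200_209/abc205_D.py | solve
-- ===== SOURCE A (Python) =====
-- def solve(N,Q,A,K) :
--     QQ = [K[i]<<20|i for i in range(Q)]
--     QQ.sort(reverse=True)
--     AA = A.copy()
--     AA.sort(reverse=True)
--     ans = [0] * Q
--     last,candsofar = 0,0
--     while QQ :
--         qv = QQ[-1] >> 20
--         qidx = QQ[-1] & 0xfffff
--         if len(AA) == 0 or qv < candsofar + (AA[-1] - last) :
--             QQ.pop()
--             ans[qidx] = last + (qv - candsofar)
--         else :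
--             aa = AA.pop()
--             candsofar += 0 if aa == last else (aa - last - 1)
--             last = aa
--     return ans
-- ===== SOURCE B (Python) =====
-- def solve(N, Q, A, K):
--     steps = []  # (bound, base_last, base_cand); bound is nondecreasing
--     last = cand = 0
--     m = 0
--     for aa in sorted(A):
--         t = cand + (aa - last)
--         if not steps or t > m:
--             m = t
--         steps.append((m, last, cand))
--         if aa != last:
--             cand += aa - last - 1
--         last = aa
--     out = []
--     for i in range(Q):
--         qv = K[i]
--         lo, hi = 0, len(steps)
--         while lo < hi:
--             mid = (lo + hi) // 2
--             if qv < steps[mid][0]: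
--                 hi = mid
--             else:
--                 lo = mid + 1
--         l, c = (last, cand) if lo == len(steps) else steps[lo][1:]
--         out.append(l + (qv - c))
--     return out
-- ===== Notes on version B (the rewrite author's own statement) =====
-- stated objective: alternative
-- what changed: A packs each query with its index into one int, sorts the queries, and answers them in a merged two-pointer sweep over reverse-sorted A, scattering results by index; B instead walks sorted A once to build a breakpoint table (threshold, base_last, base_cand) with a running-max threshold and answers each query independently, in the original order, by binary-searching that table - no query sort, no bit packing, no scatter. …
-- outside the precondition, e.g. on solve(0, 3, [], [5]): A raises IndexError, B raises IndexError
import Mathlib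
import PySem

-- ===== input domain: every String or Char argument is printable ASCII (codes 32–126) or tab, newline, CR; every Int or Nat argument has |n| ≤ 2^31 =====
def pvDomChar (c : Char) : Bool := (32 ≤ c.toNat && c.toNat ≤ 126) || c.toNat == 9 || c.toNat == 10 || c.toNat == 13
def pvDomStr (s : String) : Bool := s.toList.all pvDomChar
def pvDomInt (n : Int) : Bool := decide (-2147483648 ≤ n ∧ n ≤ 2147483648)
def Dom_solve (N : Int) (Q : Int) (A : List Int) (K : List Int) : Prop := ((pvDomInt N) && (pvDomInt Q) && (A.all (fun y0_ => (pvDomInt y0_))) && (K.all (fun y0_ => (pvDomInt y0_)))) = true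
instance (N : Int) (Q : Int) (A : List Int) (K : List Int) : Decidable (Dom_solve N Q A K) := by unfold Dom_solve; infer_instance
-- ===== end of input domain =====

-- B re-implements A's offline merged sweep (bit-packed sorted queries) as a breakpoint table over
-- sorted A plus an independent binary search per query; equal return value on Pre_, no side effects.

-- ===== PORT A =====
-- the 'while QQ' loop: both Python lists are popped from the back
def solveLoop (QQ : List Int) (AA : List Int) (ans : List Int) (last : Int) (cand : Int) : List Int :=
  if _hQ : QQ.length = 0 then ans
  else
    let qv := PySem.List.pyGetD QQ (-1) 0 >>> (20:Nat)
    let qidx := PySem.Int.band (PySem.List.pyGetD QQ (-1) 0) 1048575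
    if _hA : AA.length = 0 ∨ qv < cand + (PySem.List.pyGetD AA (-1) 0 - last) then
      solveLoop QQ.dropLast AA (PySem.List.pySetD ans qidx (last + (qv - cand))) last cand
    else
      let aa := PySem.List.pyGetD AA (-1) 0
      solveLoop QQ AA.dropLast ans aa (cand + (if aa = last then 0 else aa - last - 1))
termination_by QQ.length + AA.length
decreasing_by
  · simp only [List.length_dropLast]; omega
  · simp only [List.length_dropLast]; push Not at _hA; omega

def solve (N : Int) (Q : Int) (A : List Int) (K : List Int) : List Int :=
  let QQ := PySem.List.sorted ((PySem.List.pyRange 0 Q 1).map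
    (fun i => PySem.Int.bor ((PySem.List.pyGetD K i 0) <<< (20:Nat)) i)) (fun x => x) true
  let AA := PySem.List.sorted A (fun x => x) true
  let ans := PySem.List.pyRepeat [(0:Int)] Q
  solveLoop QQ AA ans 0 0

-- ===== PORT B =====
-- one step of B's table-building loop over sorted(A); state = (steps, last, cand, m)
def stepB (st : List (Int × Int × Int) × Int × Int × Int) (aa : Int) :
    List (Int × Int × Int) × Int × Int × Int :=
  let steps := st.1
  let last := st.2.1
  let cand := st.2.2.1
  let m := st.2.2.2
  let t := cand + (aa - last)
  let m' := if steps.length = 0 ∨ m < t then t else m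
  (steps ++ [(m', last, cand)], aa, (if aa = last then cand else cand + (aa - last - 1)), m')

-- B's 'while lo < hi' binary search on the nondecreasing bound column
def bsearchB (steps : List (Int × Int × Int)) (qv : Int) (lo : Int) (hi : Int) : Int :=
  if _h : lo < hi then
    let mid := PySem.Int.floordiv (lo + hi) 2
    if qv < (PySem.List.pyGetD steps mid (0, 0, 0)).1 then bsearchB steps qv lo mid
    else bsearchB steps qv (mid + 1) hi
  else lo
termination_by (hi - lo).toNat
decreasing_by
  · have h2 : PySem.Int.floordiv (lo + hi) 2 = (lo + hi) / 2 := Int.fdiv_eq_ediv_of_nonneg _ (by norm_num)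
    omega
  · have h2 : PySem.Int.floordiv (lo + hi) 2 = (lo + hi) / 2 := Int.fdiv_eq_ediv_of_nonneg _ (by norm_num)
    omega

def solve_alt (N : Int) (Q : Int) (A : List Int) (K : List Int) : List Int :=
  let st := (PySem.List.sorted A (fun x => x) false).foldl stepB ([], 0, 0, 0)
  let steps := st.1
  let last := st.2.1
  let cand := st.2.2.1
  (PySem.List.pyRange 0 Q 1).foldl (fun out i =>
    let qv := PySem.List.pyGetD K i 0
    let lo := bsearchB steps qv 0 steps.length
    let lc := if lo = (steps.length : Int) then (last, cand)
              else ((PySem.List.pyGetD steps lo (0, 0, 0)).2.1, (PySem.List.pyGetD steps lo (0, 0, 0)).2.2)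
    out ++ [lc.1 + (qv - lc.2)]) []

-- ===== PRECONDITION & SPEC =====
-- Pre_ excludes inputs where A raises IndexError (Q exceeds len(K)), and inputs with more than 2^20
-- queries, where A's 20-bit index packing makes distinct query indices collide so A's returned list
-- is an accident of the packing width (see claim cites).
def Pre_solve (N : Int) (Q : Int) (A : List Int) (K : List Int) : Prop :=
  Q ≤ (K.length : Int) ∧ Q ≤ 1048576
instance (N : Int) (Q : Int) (A : List Int) (K : List Int) : Decidable (Pre_solve N Q A K) := by
  unfold Pre_solve; infer_instance

def pvWitness_solve : Int × Int × List Int × List Int := (0, 2, [1, 3], [1, 4])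

def Spec_solve (N : Int) (Q : Int) (A : List Int) (K : List Int) (out : List Int) : Prop :=
  out = solve_alt N Q A K
instance (N : Int) (Q : Int) (A : List Int) (K : List Int) (out : List Int) :
    Decidable (Spec_solve N Q A K out) := by unfold Spec_solve; infer_instance

-- ===== CLAIM (what is proved, stated in full; the proofs are below) =====
def Claim_equal_solve : Prop := ∀ (N : Int) (Q : Int) (A : List Int) (K : List Int),
  Dom_solve N Q A K → Pre_solve N Q A K → Spec_solve N Q A K (solve N Q A K)

-- ===== LEMMAS AND PROOFS =====

-- ---- arithmetic facts about the 20-bit packing ----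
theorem shl20 (k : Int) : k <<< (20:Nat) = k * 1048576 := by
  have h := Int.shiftLeft_eq_mul_pow k 20
  rw [Int.shiftLeft_natCast_right] at h
  norm_num at h
  exact h

theorem shr20 (x : Int) : x >>> (20:Nat) = x / 1048576 := by
  cases x with
  | ofNat n =>
    show Int.ofNat (n >>> 20) = _
    rw [Nat.shiftRight_eq_div_pow]
    norm_num
  | negSucc n =>
    show Int.negSucc (n >>> 20) = _
    rw [Nat.shiftRight_eq_div_pow]
    norm_num
    omega

theorem lowones_and (c b : Nat) (hb : b < 1048576) : (1048576 * c + 1048575) &&& b = b := by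
  apply Nat.eq_of_testBit_eq
  intro j
  rw [Nat.testBit_and]
  by_cases hj : j < 20
  · have hmod : (1048576*c + 1048575) % 2^20 = 1048575 := by norm_num
    have h1 := Nat.testBit_mod_two_pow (1048576*c + 1048575) 20 j
    rw [hmod] at h1
    have h2 : Nat.testBit 1048575 j = true := by
      have := Nat.testBit_two_pow_sub_one 20 j
      norm_num at this
      simp [this, hj]
    rw [h2] at h1
    simp at h1
    rw [h1.2]
    simp
  · have hb' : b.testBit j = false := by
      apply Nat.testBit_eq_false_of_lt
      calc b < 1048576 := hb
        _ ≤ 2^j := by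
          have h20 : (20:Nat) ≤ j := by omega
          calc (1048576:Nat) = 2^20 := by norm_num
            _ ≤ 2^j := Nat.pow_le_pow_right (by norm_num) h20
    simp [hb']

theorem pack_eq (k i : Int) (h0 : 0 ≤ i) (h1 : i < 1048576) :
    PySem.Int.bor (k <<< (20:Nat)) i = k * 1048576 + i := by
  rw [shl20]
  unfold PySem.Int.bor
  by_cases hk : 0 ≤ k
  · rw [if_pos (by positivity), if_pos h0]
    have ht : (k*1048576).toNat = k.toNat * 1048576 := by omega
    rw [ht]
    have h2 := (Nat.two_pow_add_eq_or_of_lt (b := i.toNat) (i := 20) (by omega) k.toNat).symm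
    norm_num at h2
    rw [Nat.mul_comm 1048576 k.toNat] at h2
    rw [h2]
    omega
  · have hneg : ¬ 0 ≤ k * 1048576 := by push Not at hk ⊢; nlinarith
    rw [if_neg hneg, if_pos h0]
    have hm : (-(k*1048576) - 1).toNat = 1048576 * (-k-1).toNat + 1048575 := by omega
    rw [hm, lowones_and _ _ (by omega)]
    omega

theorem unpack_val (k i : Int) (h0 : 0 ≤ i) (h1 : i < 1048576) :
    (k * 1048576 + i) >>> (20:Nat) = k := by
  rw [shr20]; omega

theorem unpack_idx (k i : Int) (h0 : 0 ≤ i) (h1 : i < 1048576) :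
    PySem.Int.band (k * 1048576 + i) 1048575 = i := by
  unfold PySem.Int.band
  by_cases ha : 0 ≤ k * 1048576 + i
  · rw [if_pos ha, if_pos (by norm_num)]
    have h2 : (k*1048576+i).toNat &&& (1048575:Int).toNat = (k*1048576+i).toNat % 1048576 := by
      have := Nat.and_two_pow_sub_one_eq_mod ((k*1048576+i).toNat) 20
      norm_num at this
      simpa using this
    rw [h2]
    omega
  · rw [if_neg ha, if_pos (by norm_num)]
    have hand : (1048575:Int).toNat &&& (-(k*1048576+i) - 1).toNat
        = (-(k*1048576+i) - 1).toNat % 1048576 := by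
      rw [Nat.and_comm]
      have := Nat.and_two_pow_sub_one_eq_mod ((-(k*1048576+i) - 1).toNat) 20
      norm_num at this
      simpa using this
    rw [hand]
    omega

theorem shr20_mono {x y : Int} (h : x ≤ y) : x >>> (20:Nat) ≤ y >>> (20:Nat) := by
  rw [shr20, shr20]
  exact Int.ediv_le_ediv (by norm_num) h

-- ---- pySetD helpers ----
theorem pySetD_inrange (xs : List Int) (i : Int) (v : Int) (h0 : 0 ≤ i) (h1 : i < xs.length) :
    PySem.List.pySetD xs i v = xs.set i.toNat v := by
  unfold PySem.List.pySetD
  rw [show i = ((i.toNat : Nat) : Int) by omega, PySem.List.pySet?_natCast _ _ _ (by omega)]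
  rfl

theorem pySetD_out (xs : List Int) (i : Int) (v : Int) (h : (xs.length : Int) ≤ i) :
    PySem.List.pySetD xs i v = xs := by
  unfold PySem.List.pySetD
  rw [(PySem.List.pySet?_eq_none_iff xs i v).mpr (by unfold PySem.Raise.InRange; omega)]
  rfl

theorem pySetD_comm (xs : List Int) (i j v w : Int) (h0 : 0 ≤ i) (h1 : 0 ≤ j) (hne : i ≠ j) :
    PySem.List.pySetD (PySem.List.pySetD xs i v) j w
      = PySem.List.pySetD (PySem.List.pySetD xs j w) i v := by
  by_cases hi : i < xs.length
  · by_cases hj : j < xs.length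
    · rw [pySetD_inrange xs i v h0 hi, pySetD_inrange xs j w h1 hj,
        pySetD_inrange _ j w h1 (by simp; omega), pySetD_inrange _ i v h0 (by simp; omega)]
      exact List.set_comm _ _ (by omega)
    · rw [pySetD_inrange xs i v h0 hi, pySetD_out xs j w (by omega),
        pySetD_out _ j w (by simp; omega), pySetD_inrange xs i v h0 hi]
  · by_cases hj : j < xs.length
    · rw [pySetD_out xs i v (by omega), pySetD_inrange xs j w h1 hj,
        pySetD_out (xs.set j.toNat w) i v (by simp; omega)]
    · rw [pySetD_out xs i v (by omega), pySetD_out xs j w (by omega),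
        pySetD_out xs i v (by omega)]

-- ---- the reference scan: answer one query against sorted A from a given state ----
def gscan : List Int → Int → Int → Int → Int
  | [], last, cand, qv => last + (qv - cand)
  | a :: r, last, cand, qv =>
    if qv < cand + (a - last) then last + (qv - cand)
    else gscan r a (cand + (if a = last then 0 else a - last - 1)) qv

-- ---- A's loop, reformulated on the reversed (ascending) lists ----
def fLoop : List Int → List Int → List Int → Int → Int → List Int
  | [], _, ans, _, _ => ans
  | q :: qs, [], ans, last, cand =>
      fLoop qs [] (PySem.List.pySetD ans (PySem.Int.band q 1048575)
        (last + (q >>> (20:Nat) - cand))) last cand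
  | q :: qs, a :: as', ans, last, cand =>
      if q >>> (20:Nat) < cand + (a - last) then
        fLoop qs (a :: as') (PySem.List.pySetD ans (PySem.Int.band q 1048575)
          (last + (q >>> (20:Nat) - cand))) last cand
      else fLoop (q :: qs) as' ans a (cand + (if a = last then 0 else a - last - 1))
termination_by L AS _ _ _ => L.length + AS.length

theorem solveLoop_rev (L M : List Int) (ans : List Int) (last cand : Int) :
    solveLoop L.reverse M.reverse ans last cand = fLoop L M ans last cand := by
  induction L, M, ans, last, cand using fLoop.induct with
  | case1 M ans last cand =>
    rw [solveLoop]
    simp [fLoop]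
  | case2 q qs ans last cand ih =>
    rw [solveLoop]
    rw [dif_neg (by simp)]
    simp only [List.reverse_cons, List.reverse_nil, List.length_nil,
      PySem.List.pyGetD_neg_one_append_singleton, List.dropLast_concat]
    rw [dif_pos (Or.inl trivial)]
    rw [show ([] : List Int) = ([] : List Int).reverse from rfl, ih]
    simp [fLoop]
  | case3 q qs a as' ans last cand hc ih =>
    rw [solveLoop]
    rw [dif_neg (by simp)]
    simp only [List.reverse_cons,
      PySem.List.pyGetD_neg_one_append_singleton, List.dropLast_concat]
    rw [dif_pos (Or.inr hc)]
    rw [show as'.reverse ++ [a] = (a :: as').reverse by simp, ih]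
    simp only [fLoop, if_pos hc]
  | case4 q qs a as' ans last cand hc ih =>
    rw [solveLoop]
    rw [dif_neg (by simp)]
    simp only [List.reverse_cons,
      PySem.List.pyGetD_neg_one_append_singleton, List.dropLast_concat]
    rw [dif_neg (by push Not; exact ⟨by simp, by omega⟩)]
    simp only [dite_eq_ite] at ih
    rw [show qs.reverse ++ [q] = (q :: qs).reverse by simp, ih]
    simp only [fLoop, if_neg hc]

theorem sorted_true_rev (xs : List Int) :
    PySem.List.sorted xs (fun x => x) true = (PySem.List.sorted xs (fun x => x) false).reverse := by
  have h : (PySem.List.sorted xs (fun x => x) true).reverse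
      = PySem.List.sorted xs (fun x => x) false := by
    apply PySem.List.eq_of_perm_of_pairwise_le
    · exact ((List.reverse_perm _).trans (PySem.List.sorted_perm xs (fun x => x) true)).trans
        (PySem.List.sorted_perm xs (fun x => x) false).symm
    · rw [List.pairwise_reverse]
      exact PySem.List.sorted_pairwise_rev xs (fun x => x)
    · exact PySem.List.sorted_pairwise xs (fun x => x)
  rw [← h, List.reverse_reverse]

-- the merged sweep answers every query with a fresh scan of the remaining suffix
theorem fLoop_scatter (L : List Int) : ∀ (AS ans : List Int) (last cand : Int),
    L.Pairwise (fun x y : Int => x >>> (20:Nat) ≤ y >>> (20:Nat)) →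
    fLoop L AS ans last cand =
      L.foldl (fun a x => PySem.List.pySetD a (PySem.Int.band x 1048575)
        (gscan AS last cand (x >>> (20:Nat)))) ans := by
  induction L with
  | nil => intro AS ans last cand _; cases AS <;> simp [fLoop]
  | cons q qs ih =>
    intro AS ans last cand hp
    rcases List.pairwise_cons.mp hp with ⟨hhead, htail⟩
    induction AS generalizing last cand with
    | nil =>
      simp only [fLoop, List.foldl_cons]
      rw [ih _ _ _ _ htail]
      simp [gscan]
    | cons a as' iha =>
      by_cases hc : q >>> (20:Nat) < cand + (a - last)
      · simp only [fLoop, if_pos hc, List.foldl_cons]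
        rw [ih _ _ _ _ htail]
        simp only [gscan, if_pos hc]
      · simp only [fLoop, if_neg hc, List.foldl_cons]
        rw [iha _ _]
        refine (PySem.List.foldl_congr_mem' _ _ _ _ ?_).symm
        intro x hx acc
        have hxq : q >>> (20:Nat) ≤ x >>> (20:Nat) := by
          rcases List.mem_cons.mp hx with rfl | hx'
          · exact le_refl _
          · exact hhead x hx'
        have hxc : ¬ x >>> (20:Nat) < cand + (a - last) := by omega
        simp only [gscan, if_neg hxc]

theorem scatter_fill (Q : Int) (v : Int → Int) :
    (PySem.List.pyRange 0 Q 1).foldl (fun a i => PySem.List.pySetD a i (v i))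
        (List.replicate Q.toNat 0)
      = (PySem.List.pyRange 0 Q 1).map v := by
  by_cases hQ : Q ≤ 0
  · rw [PySem.List.pyRange_one_eq_nil (by omega)]
    simp [Int.toNat_of_nonpos hQ]
  · have main : ∀ n : Nat, (n:Int) ≤ Q →
        (PySem.List.pyRange 0 (n:Int) 1).foldl (fun a i => PySem.List.pySetD a i (v i))
          (List.replicate Q.toNat 0)
        = (PySem.List.pyRange 0 (n:Int) 1).map v ++ List.replicate (Q.toNat - n) 0 := by
      intro n hn
      induction n with
      | zero => simp [PySem.List.pyRange_one_eq_nil]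
      | succ k ihk =>
        have hk : (k:Int) ≤ Q := by push_cast at hn ⊢; omega
        rw [show ((k+1 : Nat):Int) = (k:Int)+1 by push_cast; ring]
        rw [PySem.List.pyRange_one_succ_right (by positivity)]
        rw [List.foldl_append, List.map_append, ihk hk]
        simp only [List.foldl_cons, List.foldl_nil, List.map_cons, List.map_nil]
        have hlen1 : ((PySem.List.pyRange 0 (k:Int) 1).map v).length = k := by
          simp [PySem.List.length_pyRange_one]
        have hlen : (((PySem.List.pyRange 0 (k:Int) 1).map v) ++ List.replicate (Q.toNat - k) 0).length = Q.toNat := by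
          simp [hlen1]; omega
        rw [pySetD_inrange _ _ _ (by positivity) (by rw [hlen]; push_cast at hn ⊢; omega)]
        rw [Int.toNat_natCast, List.set_append, if_neg (by rw [hlen1]; omega)]
        rw [hlen1, Nat.sub_self]
        rw [show Q.toNat - k = (Q.toNat - (k+1)) + 1 by push_cast at hn; omega]
        rw [List.replicate_succ, List.set_cons_zero]
        simp
    have h2 := main Q.toNat (by omega)
    rw [Int.toNat_of_nonneg (by omega)] at h2
    simpa using h2

-- ---- B-side helpers: recursive versions of the table builder ----
def tabB : List Int → Int → Int → Int → Bool → List (Int × Int × Int)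
  | [], _, _, _, _ => []
  | a :: r, last, cand, m, empt =>
    let t := cand + (a - last)
    let m' := if empt = true ∨ m < t then t else m
    (m', last, cand) :: tabB r a (if a = last then cand else cand + (a - last - 1)) m' false

def finLC : List Int → Int → Int → Int × Int
  | [], last, cand => (last, cand)
  | a :: r, last, cand => finLC r a (if a = last then cand else cand + (a - last - 1))

def firstIdx (steps : List (Int × Int × Int)) (qv : Int) : Nat :=
  match steps with
  | [] => 0
  | e :: r => if qv < e.1 then 0 else (firstIdx r qv) + 1

theorem foldl_stepB (S : List Int) : ∀ (acc : List (Int × Int × Int)) (last cand m : Int),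
    ∃ mf, S.foldl stepB (acc, last, cand, m)
      = (acc ++ tabB S last cand m (acc.length == 0), (finLC S last cand).1, (finLC S last cand).2, mf) := by
  induction S with
  | nil => intro acc last cand m; exact ⟨m, by simp [tabB, finLC]⟩
  | cons a S ih =>
    intro acc last cand m
    rw [List.foldl_cons]
    have hstep : stepB (acc, last, cand, m) a
        = (acc ++ [(if acc.length = 0 ∨ m < cand + (a - last) then cand + (a - last) else m, last, cand)],
           a, (if a = last then cand else cand + (a - last - 1)),
           (if acc.length = 0 ∨ m < cand + (a - last) then cand + (a - last) else m)) := rfl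
    rw [hstep]
    obtain ⟨mf, hmf⟩ := ih (acc ++ [((if acc.length = 0 ∨ m < cand + (a - last) then cand + (a - last) else m), last, cand)]) a (if a = last then cand else cand + (a - last - 1)) (if acc.length = 0 ∨ m < cand + (a - last) then cand + (a - last) else m)
    refine ⟨mf, ?_⟩
    rw [hmf]
    simp only [tabB, finLC, List.length_append, List.length_cons, List.length_nil, List.append_assoc,
      List.cons_append, List.nil_append]
    have h1 : (acc.length + (0 + 1) == 0) = false := by simp
    have h2 : (((acc.length == 0) = true) ∨ m < cand + (a - last)) ↔ (acc.length = 0 ∨ m < cand + (a - last)) := by simp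
    rw [h1]
    by_cases hc : acc.length = 0 ∨ m < cand + (a - last)
    · rw [if_pos hc, if_pos (h2.mpr hc)]
    · rw [if_neg hc, if_neg (fun h => hc (h2.mp h))]

theorem tab_lb (S : List Int) : ∀ (last cand m : Int) (e : Int × Int × Int),
    e ∈ tabB S last cand m false → m ≤ e.1 := by
  induction S with
  | nil => simp [tabB]
  | cons a S ih =>
    intro last cand m e he
    simp only [tabB, List.mem_cons, Bool.false_eq_true, false_or] at he
    by_cases hm : m < cand + (a - last)
    · rw [if_pos hm] at he
      rcases he with rfl | he
      · simp; omega
      · have := ih a (if a = last then cand else cand + (a - last - 1)) _ e he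
        omega
    · rw [if_neg hm] at he
      rcases he with rfl | he
      · simp
      · exact ih a (if a = last then cand else cand + (a - last - 1)) _ e he

theorem tab_pairwise (S : List Int) : ∀ (last cand m : Int) (empt : Bool),
    (tabB S last cand m empt).Pairwise (fun p q => p.1 ≤ q.1) := by
  induction S with
  | nil => simp [tabB]
  | cons a S ih =>
    intro last cand m empt
    simp only [tabB]
    rw [List.pairwise_cons]
    exact ⟨fun e he => tab_lb S a _ _ e he, ih a _ _ false⟩

theorem firstIdx_le (steps : List (Int × Int × Int)) (qv : Int) : firstIdx steps qv ≤ steps.length := by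
  induction steps with
  | nil => simp [firstIdx]
  | cons e r ih => simp only [firstIdx, List.length_cons]; split <;> omega

theorem firstIdx_lt (steps : List (Int × Int × Int)) (qv : Int) :
    ∀ k (hk : k < steps.length), k < firstIdx steps qv → ¬ qv < (steps[k]).1 := by
  induction steps with
  | nil => simp
  | cons e r ih =>
    intro k hk hlt
    simp only [firstIdx] at hlt
    by_cases hq : qv < e.1
    · simp [hq] at hlt
    · rw [if_neg hq] at hlt
      cases k with
      | zero => simpa using hq
      | succ k' => exact ih k' (by simpa using hk) (by omega)

theorem firstIdx_ge (steps : List (Int × Int × Int)) (qv : Int)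
    (hp : steps.Pairwise (fun p q => p.1 ≤ q.1)) :
    ∀ k (hk : k < steps.length), firstIdx steps qv ≤ k → qv < (steps[k]).1 := by
  induction steps with
  | nil => simp
  | cons e r ih =>
    intro k hk hle
    simp only [firstIdx] at hle
    rcases List.pairwise_cons.mp hp with ⟨hhead, htail⟩
    by_cases hq : qv < e.1
    · cases k with
      | zero => simpa using hq
      | succ k' =>
        have hk' : k' < r.length := by simpa using hk
        have hle' : e.1 ≤ (r[k']).1 := hhead _ (List.getElem_mem hk')
        simp only [List.getElem_cons_succ]
        omega
    · rw [if_neg hq] at hle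
      cases k with
      | zero => omega
      | succ k' => exact ih htail k' (by simpa using hk) (by omega)

theorem bsearchB_eq (steps : List (Int × Int × Int)) (qv : Int)
    (hp : steps.Pairwise (fun p q => p.1 ≤ q.1)) :
    ∀ (lo hi : Int), 0 ≤ lo → hi ≤ steps.length →
      lo ≤ (firstIdx steps qv : Int) → (firstIdx steps qv : Int) ≤ hi →
      bsearchB steps qv lo hi = (firstIdx steps qv : Int) := by
  suffices H : ∀ n : Nat, ∀ lo hi : Int, (hi - lo).toNat = n → 0 ≤ lo → hi ≤ steps.length →
      lo ≤ (firstIdx steps qv : Int) → (firstIdx steps qv : Int) ≤ hi →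
      bsearchB steps qv lo hi = (firstIdx steps qv : Int) by
    intro lo hi h0 h1 h2 h3
    exact H (hi - lo).toNat lo hi rfl h0 h1 h2 h3
  intro n
  induction n using Nat.strong_induction_on with
  | _ n ihn =>
    intro lo hi hn h0 hhi hlo hFhi
    rw [bsearchB]
    by_cases hlt : lo < hi
    · rw [dif_pos hlt]
      show (if qv < (PySem.List.pyGetD steps (PySem.Int.floordiv (lo+hi) 2) (0,0,0)).1
        then bsearchB steps qv lo (PySem.Int.floordiv (lo+hi) 2)
        else bsearchB steps qv (PySem.Int.floordiv (lo+hi) 2 + 1) hi) = (firstIdx steps qv : Int)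
      have hfd : PySem.Int.floordiv (lo + hi) 2 = (lo + hi) / 2 :=
        Int.fdiv_eq_ediv_of_nonneg _ (by norm_num)
      have hmlo : lo ≤ PySem.Int.floordiv (lo + hi) 2 := by rw [hfd]; omega
      have hmhi : PySem.Int.floordiv (lo + hi) 2 < hi := by rw [hfd]; omega
      have hmlen : (PySem.Int.floordiv (lo + hi) 2).toNat < steps.length := by omega
      rw [PySem.List.pyGetD_eq_getElem _ _ (by omega) (by omega)]
      by_cases hc : qv < (steps[(PySem.Int.floordiv (lo + hi) 2).toNat]).1
      · rw [if_pos hc]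
        have hFm : (firstIdx steps qv : Int) ≤ PySem.Int.floordiv (lo + hi) 2 := by
          by_contra hcon
          exact (firstIdx_lt steps qv _ hmlen (by omega)) hc
        exact ihn (PySem.Int.floordiv (lo + hi) 2 - lo).toNat (by omega) lo _ rfl h0 (by omega) hlo hFm
      · rw [if_neg hc]
        have hFm : PySem.Int.floordiv (lo + hi) 2 < (firstIdx steps qv : Int) := by
          by_contra hcon
          exact hc (firstIdx_ge steps qv hp _ hmlen (by omega))
        exact ihn (hi - (PySem.Int.floordiv (lo + hi) 2 + 1)).toNat (by omega) _ hi rfl (by omega) hhi (by omega) hFhi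
    · rw [dif_neg hlt]
      omega

theorem tab_answer (S : List Int) : ∀ (last cand m : Int) (empt : Bool) (qv : Int),
    (empt = true ∨ ¬ qv < m) →
    (if h : firstIdx (tabB S last cand m empt) qv < (tabB S last cand m empt).length then
      ((tabB S last cand m empt)[firstIdx (tabB S last cand m empt) qv]).2.1
        + (qv - ((tabB S last cand m empt)[firstIdx (tabB S last cand m empt) qv]).2.2)
     else (finLC S last cand).1 + (qv - (finLC S last cand).2))
      = gscan S last cand qv := by
  induction S with
  | nil =>
    intro last cand m empt qv _
    simp [tabB, firstIdx, finLC, gscan]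
  | cons a S ih =>
    intro last cand m empt qv hm
    by_cases hq : qv < (if empt = true ∨ m < cand + (a - last) then cand + (a - last) else m)
    · have hmt : (if empt = true ∨ m < cand + (a - last) then cand + (a - last) else m) = cand + (a - last) := by
        rcases hm with he | hnq
        · rw [if_pos (Or.inl he)]
        · by_cases hc : empt = true ∨ m < cand + (a - last)
          · rw [if_pos hc]
          · rw [if_neg hc] at hq; exact absurd hq hnq
      rw [hmt] at hq
      simp only [tabB, firstIdx, hmt, if_pos hq]
      rw [dif_pos (by simp)]
      simp only [List.getElem_cons_zero]
      simp [gscan, if_pos hq]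
    · have hqt : ¬ qv < cand + (a - last) := by
        intro hqt'
        apply hq
        by_cases hc : empt = true ∨ m < cand + (a - last)
        · rw [if_pos hc]; exact hqt'
        · rcases hm with he | hnq
          · exact absurd (Or.inl he) hc
          · rw [if_neg hc]; push Not at hc; omega
      have ihx := ih a (if a = last then cand else cand + (a - last - 1))
        (if empt = true ∨ m < cand + (a - last) then cand + (a - last) else m) false qv (Or.inr hq)
      simp only [tabB, firstIdx, if_neg hq, List.length_cons, List.getElem_cons_succ, finLC,
        Nat.add_lt_add_iff_right] at ihx ⊢
      rw [ihx]
      have hcand : (if a = last then cand else cand + (a - last - 1))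
          = cand + (if a = last then 0 else a - last - 1) := by split_ifs <;> ring
      simp only [gscan, if_neg hqt, hcand]

-- ---- assembly ----
theorem B_eq_map (N Q : Int) (A K : List Int) :
    solve_alt N Q A K = (PySem.List.pyRange 0 Q 1).map
      (fun i => gscan (PySem.List.sorted A (fun x => x) false) 0 0 (PySem.List.pyGetD K i 0)) := by
  obtain ⟨mf, hmf⟩ := foldl_stepB (PySem.List.sorted A (fun x => x) false) [] 0 0 0
  simp only [List.nil_append, List.length_nil, beq_self_eq_true] at hmf
  simp only [solve_alt]
  rw [hmf]
  simp only []
  rw [PySem.List.foldl_append_singleton_eq_map]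
  simp only [List.nil_append]
  apply List.map_congr_left
  intro i _
  have hp := tab_pairwise (PySem.List.sorted A (fun x => x) false) 0 0 0 true
  have hbs := bsearchB_eq (tabB (PySem.List.sorted A (fun x => x) false) 0 0 0 true)
    (PySem.List.pyGetD K i 0) hp 0
    ((tabB (PySem.List.sorted A (fun x => x) false) 0 0 0 true).length : Int)
    (le_refl 0) (le_refl _) (by positivity)
    (by exact_mod_cast firstIdx_le (tabB (PySem.List.sorted A (fun x => x) false) 0 0 0 true) (PySem.List.pyGetD K i 0))
  rw [hbs]
  have hta := tab_answer (PySem.List.sorted A (fun x => x) false) 0 0 0 true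
    (PySem.List.pyGetD K i 0) (Or.inl rfl)
  by_cases hj : firstIdx (tabB (PySem.List.sorted A (fun x => x) false) 0 0 0 true)
      (PySem.List.pyGetD K i 0) < (tabB (PySem.List.sorted A (fun x => x) false) 0 0 0 true).length
  · rw [dif_pos hj] at hta
    rw [if_neg (by exact_mod_cast Nat.ne_of_lt hj)]
    rw [PySem.List.pyGetD_eq_getElem _ _ (by positivity) (by exact_mod_cast hj)]
    simp only [Int.toNat_natCast]
    exact hta
  · rw [dif_neg hj] at hta
    have hEq : firstIdx (tabB (PySem.List.sorted A (fun x => x) false) 0 0 0 true)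
        (PySem.List.pyGetD K i 0)
        = (tabB (PySem.List.sorted A (fun x => x) false) 0 0 0 true).length :=
      le_antisymm (firstIdx_le _ _) (not_lt.mp hj)
    rw [if_pos (by exact_mod_cast hEq)]
    exact hta

theorem A_eq_map (N Q : Int) (A K : List Int) (h2 : Q ≤ 1048576) :
    solve N Q A K = (PySem.List.pyRange 0 Q 1).map
      (fun i => gscan (PySem.List.sorted A (fun x => x) false) 0 0 (PySem.List.pyGetD K i 0)) := by
  simp only [solve]
  rw [sorted_true_rev, sorted_true_rev, PySem.List.pyRepeat_singleton, solveLoop_rev]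
  have hmem : ∀ x ∈ PySem.List.sorted ((PySem.List.pyRange 0 Q 1).map
      (fun i => PySem.Int.bor ((PySem.List.pyGetD K i 0) <<< (20:Nat)) i)) (fun x => x) false,
      ∃ i : Int, 0 ≤ i ∧ i < Q ∧ x = PySem.List.pyGetD K i 0 * 1048576 + i := by
    intro x hx
    have hx' := (PySem.List.sorted_perm ((PySem.List.pyRange 0 Q 1).map
      (fun i => PySem.Int.bor ((PySem.List.pyGetD K i 0) <<< (20:Nat)) i)) (fun x => x) false).mem_iff.mp hx
    rcases List.mem_map.mp hx' with ⟨i, hi, rfl⟩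
    rcases PySem.List.mem_pyRange_one.mp hi with ⟨h0i, hiQ⟩
    exact ⟨i, h0i, hiQ, pack_eq _ _ h0i (by omega)⟩
  have hmono : (PySem.List.sorted ((PySem.List.pyRange 0 Q 1).map
      (fun i => PySem.Int.bor ((PySem.List.pyGetD K i 0) <<< (20:Nat)) i)) (fun x => x) false).Pairwise
      (fun x y : Int => x >>> (20:Nat) ≤ y >>> (20:Nat)) :=
    List.Pairwise.imp (fun h => shr20_mono h) (PySem.List.sorted_pairwise _ _)
  rw [fLoop_scatter _ _ _ _ _ hmono]
  have hcomm : ∀ x ∈ PySem.List.sorted ((PySem.List.pyRange 0 Q 1).map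
      (fun i => PySem.Int.bor ((PySem.List.pyGetD K i 0) <<< (20:Nat)) i)) (fun x => x) false,
      ∀ y ∈ PySem.List.sorted ((PySem.List.pyRange 0 Q 1).map
      (fun i => PySem.Int.bor ((PySem.List.pyGetD K i 0) <<< (20:Nat)) i)) (fun x => x) false,
      ∀ z : List Int,
      PySem.List.pySetD (PySem.List.pySetD z (PySem.Int.band x 1048575)
          (gscan (PySem.List.sorted A (fun x => x) false) 0 0 (x >>> (20:Nat))))
        (PySem.Int.band y 1048575) (gscan (PySem.List.sorted A (fun x => x) false) 0 0 (y >>> (20:Nat)))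
      = PySem.List.pySetD (PySem.List.pySetD z (PySem.Int.band y 1048575)
          (gscan (PySem.List.sorted A (fun x => x) false) 0 0 (y >>> (20:Nat))))
        (PySem.Int.band x 1048575) (gscan (PySem.List.sorted A (fun x => x) false) 0 0 (x >>> (20:Nat))) := by
    intro x hx y hy z
    rcases hmem x hx with ⟨i, h0i, hiQ, rfl⟩
    rcases hmem y hy with ⟨j, h0j, hjQ, rfl⟩
    by_cases hij : i = j
    · subst hij; rfl
    · rw [unpack_idx _ _ h0i (by omega), unpack_idx _ _ h0j (by omega)]
      exact pySetD_comm _ _ _ _ _ h0i h0j hij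
  rw [List.Perm.foldl_eq' (PySem.List.sorted_perm _ _ _) hcomm]
  rw [List.foldl_map]
  have hcg : ∀ i ∈ PySem.List.pyRange 0 Q 1, ∀ acc : List Int,
      PySem.List.pySetD acc
        (PySem.Int.band (PySem.Int.bor ((PySem.List.pyGetD K i 0) <<< (20:Nat)) i) 1048575)
        (gscan (PySem.List.sorted A (fun x => x) false) 0 0
          ((PySem.Int.bor ((PySem.List.pyGetD K i 0) <<< (20:Nat)) i) >>> (20:Nat)))
      = PySem.List.pySetD acc i
          (gscan (PySem.List.sorted A (fun x => x) false) 0 0 (PySem.List.pyGetD K i 0)) := by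
    intro i hi acc
    rcases PySem.List.mem_pyRange_one.mp hi with ⟨h0i, hiQ⟩
    rw [pack_eq _ _ h0i (by omega), unpack_idx _ _ h0i (by omega), unpack_val _ _ h0i (by omega)]
  rw [PySem.List.foldl_congr_mem' _ _
    (fun acc i => PySem.List.pySetD acc i
      (gscan (PySem.List.sorted A (fun x => x) false) 0 0 (PySem.List.pyGetD K i 0))) _ hcg]
  exact scatter_fill Q _

-- ===== VERDICT (by name: the statement is the Claim_ definition above) =====
theorem solve_spec : Claim_equal_solve := by
  intro N Q A K _hd hpre
  unfold Spec_solve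
  rw [A_eq_map N Q A K hpre.2, B_eq_map N Q A K]
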